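-- pv_equiv track=rewrite | github.com/DaniilKrivencev/Kriptografi | belazo.py | _build_belazo_matrix
-- ===== SOURCE A (Python) =====
-- def _norm_text(text: str, alphabet: str) -> str:
--     """Оставляет в тексте только символы из алфавита."""
--     return "".join(c.upper() for c in text if c.upper() in alphabet)
--
-- def _build_belazo_matrix(alphabet: str, key: str) -> list:
--     """Строит матрицу замены Белазо."""
--     key_chars = _norm_text(key, alphabet)
--     if not key_chars:
--         key_chars = alphabet[0]
--     n = len(alphabet)
--     matrix = [list(alphabet)]
--     for k in key_chars:
--         start = alphabet.index(k)
--         row = [alphabet[(start + i) % n] for i in range(n)]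
--         matrix.append(row)
--     return matrix
-- ===== SOURCE B (Python) =====
-- def _norm_text(text: str, alphabet: str) -> str:
--     """Оставляет в тексте только символы из алфавита."""
--     return "".join(c.upper() for c in text if c.upper() in alphabet)
--
-- def _build_belazo_matrix(alphabet: str, key: str) -> list:
--     """Строит матрицу замены Белазо: каждая строка — circular rotation алфавита."""
--     key_chars = _norm_text(key, alphabet) or alphabet[0]
--
--     def rotated(k):
--         s = alphabet.index(k)
--         return list(alphabet[s:] + alphabet[:s])
--
--     return [list(alphabet)] + [rotated(k) for k in key_chars]
-- ===== Notes on version B (the rewrite author's own statement) =====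
-- stated objective: idiomatic
-- what changed: Each matrix row is built as the closed-form slice rotation alphabet[s:]+alphabet[:s] and the matrix as a prepended list comprehension (with the 'or' default idiom), instead of A's per-position modular-index comprehension accumulated by appending in a loop.
import Mathlib
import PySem

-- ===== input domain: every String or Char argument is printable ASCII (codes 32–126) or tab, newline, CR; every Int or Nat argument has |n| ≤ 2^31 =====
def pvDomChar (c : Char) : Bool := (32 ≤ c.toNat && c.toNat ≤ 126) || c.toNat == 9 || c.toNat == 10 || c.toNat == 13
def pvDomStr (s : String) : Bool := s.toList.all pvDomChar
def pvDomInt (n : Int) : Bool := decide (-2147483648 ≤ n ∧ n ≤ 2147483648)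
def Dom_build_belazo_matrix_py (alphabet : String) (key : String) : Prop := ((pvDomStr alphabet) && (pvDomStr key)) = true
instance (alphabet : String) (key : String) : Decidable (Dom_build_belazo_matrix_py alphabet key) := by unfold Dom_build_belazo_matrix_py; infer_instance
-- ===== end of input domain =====

-- B keeps A's key normalisation and builds each row as a closed-form slice rotation
-- alphabet[s:] + alphabet[:s] instead of A's per-position modular-index comprehension (objective: idiomatic).

-- ===== PORT A =====
-- _norm_text, shared verbatim by both Pythons: "".join(c.upper() for c in text if c.upper() in alphabet)
def pvNorm (text ach : List Char) : List Char :=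
  text.foldl (fun acc c =>
    if PySem.Chars.isIn [PySem.Chars.upperChar c] ach then acc ++ [PySem.Chars.upperChar c] else acc) []

def build_belazo_matrix_py (alphabet : String) (key : String) : List (List String) :=
  let ach := alphabet.toList
  let kc0 := pvNorm key.toList ach
  -- 'key_chars = alphabet[0]': alphabet[0] raises IndexError on an empty alphabet, excluded by Pre_
  let kc := if kc0 = [] then ((PySem.List.pyGet? ach 0).map (fun c => [c])).getD [] else kc0
  let n : Int := (ach.length : Int)
  let matrix : List (List String) := [ach.map (fun c => String.ofList [c])]
  kc.foldl (fun m k =>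
    let start := PySem.Chars.find ach [k]
    let row := (PySem.List.pyRange 0 n 1).map (fun i =>
      ((PySem.List.pyGet? ach (PySem.Int.mod (start + i) n)).map (fun c => String.ofList [c])).getD "")
    m ++ [row]) matrix

-- ===== PORT B =====
def build_belazo_matrix_py_alt (alphabet : String) (key : String) : List (List String) :=
  let ach := alphabet.toList
  let kc0 := pvNorm key.toList ach
  let kc := if kc0 = [] then ((PySem.List.pyGet? ach 0).map (fun c => [c])).getD [] else kc0
  let rotated := fun (k : Char) =>
    let s := PySem.Chars.find ach [k]
    (PySem.List.slice ach (some s) none ++ PySem.List.slice ach none (some s)).map (fun c => String.ofList [c])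
  (ach.map (fun c => String.ofList [c])) :: kc.map rotated

-- ===== PRECONDITION & SPEC =====
-- A raises IndexError on 'alphabet[0]' exactly when the alphabet is empty (then the normalised key is empty too).
def Pre_build_belazo_matrix_py (alphabet : String) (key : String) : Prop := alphabet ≠ ""
instance (alphabet : String) (key : String) : Decidable (Pre_build_belazo_matrix_py alphabet key) := by unfold Pre_build_belazo_matrix_py; infer_instance
def pvWitness_build_belazo_matrix_py : String × String := ("ABC", "b")

def Spec_build_belazo_matrix_py (alphabet : String) (key : String) (out : List (List String)) : Prop := out = build_belazo_matrix_py_alt alphabet key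
instance (alphabet : String) (key : String) (out : List (List String)) : Decidable (Spec_build_belazo_matrix_py alphabet key out) := by unfold Spec_build_belazo_matrix_py; infer_instance

-- ===== CLAIM (what is proved, stated in full; the proofs are below) =====
def Claim_equal_build_belazo_matrix_py : Prop := ∀ (alphabet : String) (key : String), Dom_build_belazo_matrix_py alphabet key → Pre_build_belazo_matrix_py alphabet key → Spec_build_belazo_matrix_py alphabet key (build_belazo_matrix_py alphabet key)

-- ===== LEMMAS AND PROOFS =====

theorem pvNorm_mem_aux (ach text acc : List Char) (hacc : ∀ x ∈ acc, x ∈ ach) :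
    ∀ k ∈ text.foldl (fun acc c =>
      if PySem.Chars.isIn [PySem.Chars.upperChar c] ach then acc ++ [PySem.Chars.upperChar c] else acc) acc,
      k ∈ ach := by
  induction text generalizing acc with
  | nil => simpa using hacc
  | cons c t ih =>
    simp only [List.foldl_cons]
    split
    · rename_i hcond
      apply ih
      intro x hx
      rcases List.mem_append.1 hx with h | h
      · exact hacc x h
      · have := ((PySem.Chars.isIn_iff_infix _ _).1 hcond).subset
        exact this (by simpa using h)
    · exact ih acc hacc

theorem pvNorm_mem {text ach : List Char} {k : Char} (hk : k ∈ pvNorm text ach) : k ∈ ach :=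
  pvNorm_mem_aux ach text [] (by simp) k hk

theorem pvRow_eq (ach : List Char) (k : Char) (hk : k ∈ ach) :
    (PySem.List.pyRange 0 (ach.length : Int) 1).map (fun i =>
      ((PySem.List.pyGet? ach (PySem.Int.mod (PySem.Chars.find ach [k] + i) (ach.length : Int))).map
        (fun c => String.ofList [c])).getD "")
    = (PySem.List.slice ach (some (PySem.Chars.find ach [k])) none
        ++ PySem.List.slice ach none (some (PySem.Chars.find ach [k]))).map (fun c => String.ofList [c]) := by
  obtain ⟨p, q, hpq⟩ := List.append_of_mem hk
  have hinf : [k] <:+: ach := ⟨p, q, by simp [hpq]⟩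
  have h0 : 0 ≤ PySem.Chars.find ach [k] := (PySem.Chars.find_nonneg_iff _ _).2 hinf
  obtain ⟨hpre, -⟩ := PySem.Chars.find_spec h0
  have ht : PySem.Chars.find ach [k] = ((PySem.Chars.find ach [k]).toNat : Int) :=
    (Int.toNat_of_nonneg h0).symm
  set t := (PySem.Chars.find ach [k]).toNat with htdef
  have hlt : t < ach.length := by
    by_contra h
    push Not at h
    rw [List.drop_eq_nil_of_le h] at hpre
    simp at hpre
  rw [ht, PySem.List.slice_from_natCast, PySem.List.slice_to_natCast,
    ← List.rotate_eq_drop_append_take (le_of_lt hlt), PySem.List.pyRange_zero_natCast, List.map_map]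
  apply List.ext_getElem
  · simp
  · intro i h1 h2
    simp only [List.getElem_map, List.getElem_range, List.getElem_rotate, Function.comp_apply]
    have hcast : PySem.Int.mod ((t : Int) + (i : Int)) (ach.length : Int) = (((t + i) % ach.length : Nat) : Int) := by
      rw [← Int.natCast_add]; exact PySem.Int.mod_natCast _ _
    rw [hcast, PySem.List.pyGet?_natCast, Nat.add_comm t i,
      List.getElem?_eq_getElem (Nat.mod_lt _ (by omega))]
    simp

-- every key character (normalised, or the default alphabet[0]) is a character of the alphabet
theorem pvKc_mem (ach kch : List Char) (hne : ach ≠ []) :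
    ∀ k ∈ (if pvNorm kch ach = [] then ((PySem.List.pyGet? ach 0).map (fun c => [c])).getD [] else pvNorm kch ach),
      k ∈ ach := by
  split
  · cases ach with
    | nil => exact absurd rfl hne
    | cons a t => intro k hk; simp [PySem.List.pyGet?, PySem.List.pyIdx?] at hk; simp [hk]
  · intro k hk; exact pvNorm_mem hk

-- ===== VERDICT (by name: the statement is the Claim_ definition above) =====
theorem build_belazo_matrix_py_spec : Claim_equal_build_belazo_matrix_py := by
  intro alphabet key _ hpre
  unfold Spec_build_belazo_matrix_py build_belazo_matrix_py build_belazo_matrix_py_alt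
  simp only []
  rw [PySem.List.foldl_append_singleton_eq_map, List.singleton_append]
  have hne : alphabet.toList ≠ [] := by
    intro h; exact hpre (by cases alphabet; simpa using congrArg String.ofList h)
  refine congrArg _ (List.map_congr_left ?_)
  intro k hk
  exact pvRow_eq alphabet.toList k (pvKc_mem alphabet.toList key.toList hne k hk)
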